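-- pv_equiv track=rewrite | github.com/TetorCo/daliy_commit_backjoon | 220304_12904.py | TtoS
-- ===== SOURCE A (Python) =====
-- def TtoS(S, T):
--     if len(S) != len(T):
--         if T[-1] == 'A':
--             T.pop()
--             TtoS(S, T)
--         else:
--             T.pop()
--             T.reverse()
--             TtoS(S, T)
--     if S == T:
--         return 1
--     else: return 0
-- ===== SOURCE B (Python) =====
-- def TtoS(S, T):
--     # Two index pointers into T plus a direction flag: dropping the
--     # "current last" element moves one pointer; a 'B'-op flips the flag
--     # instead of physically reversing; one final slice/reverse at the end.
--     # (Unlike the original, T is not mutated; return value is identical.)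
--     lo, hi, rev = 0, len(T), False
--     n = len(S)
--     while hi - lo > n:
--         if rev:
--             last = T[lo]
--             lo += 1
--         else:
--             last = T[hi - 1]
--             hi -= 1
--         if last != 'A':
--             rev = not rev
--     seg = T[lo:hi]
--     if rev:
--         seg = seg[::-1]
--     return 1 if S == seg else 0
-- ===== Notes on version B (the rewrite author's own statement) =====
-- stated objective: alternative
-- what changed: Replaces the recursive pop/physical-reverse simulation with a single pass using two index pointers and a reversal-direction flag (one final slice/reverse), and does not mutate T.
import Mathlib
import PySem

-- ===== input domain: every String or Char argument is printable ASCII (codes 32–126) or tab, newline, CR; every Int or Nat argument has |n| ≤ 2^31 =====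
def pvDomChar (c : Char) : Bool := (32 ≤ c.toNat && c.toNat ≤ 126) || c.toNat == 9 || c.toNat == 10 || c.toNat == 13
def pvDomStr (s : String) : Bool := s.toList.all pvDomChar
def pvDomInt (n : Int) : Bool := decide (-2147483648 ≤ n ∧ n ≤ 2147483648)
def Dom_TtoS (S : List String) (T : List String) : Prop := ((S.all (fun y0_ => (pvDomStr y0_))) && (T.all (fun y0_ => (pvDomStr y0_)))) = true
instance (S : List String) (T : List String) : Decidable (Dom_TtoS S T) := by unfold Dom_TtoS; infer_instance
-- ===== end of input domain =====

-- B replaces A's recursive pop / physical-reverse simulation by a single two-pointer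
-- scan with a direction flag (one final slice/reverse).  Return value only:
-- A mutates T in place (pop/reverse); B does not.

-- ===== PORT A =====
-- A is a recursive function mutating T; every frame discards the recursive result
-- and falls through to compare S with the FINAL mutated T, so the comparison at
-- the top frame (the returned value) sees the final value of T, modelled by aLoopA.
def aLoopA (S : List String) (T : List String) : List String :=
  if S.length = T.length then T
  else if h : T = [] then T   -- Python raises IndexError (T[-1] on empty T); excluded by Pre_TtoS
  else if T.getLastD "" = "A" then   -- T[-1] on nonempty T
    aLoopA S T.dropLast              -- T.pop()
  else
    aLoopA S T.dropLast.reverse      -- T.pop(); T.reverse()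
termination_by T.length
decreasing_by
  all_goals
    simp only [List.length_reverse, List.length_dropLast]
    have : T.length ≠ 0 := fun hl => h (List.eq_nil_of_length_eq_zero hl)
    omega

def TtoS (S : List String) (T : List String) : Int :=
  if S = aLoopA S T then 1 else 0

-- ===== PORT B =====
-- Source B's while loop: state (lo, hi, rev); fuel = T.length is only a totality guard
-- (the loop runs at most hi - lo ≤ len(T) times).  T[lo] / T[hi-1] are in range
-- whenever the loop body runs (hi - lo > len(S) ≥ 0, hi ≤ len(T)), so getD is exact.
def bLoop (S : List String) (T : List String) : Nat → Nat → Nat → Bool → Nat × Nat × Bool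
  | 0, lo, hi, rev => (lo, hi, rev)
  | fuel + 1, lo, hi, false =>
    if S.length < hi - lo then
      bLoop S T fuel lo (hi - 1) (if T.getD (hi - 1) "" ≠ "A" then true else false)
    else (lo, hi, false)
  | fuel + 1, lo, hi, true =>
    if S.length < hi - lo then
      bLoop S T fuel (lo + 1) hi (if T.getD lo "" ≠ "A" then false else true)
    else (lo, hi, true)

-- seg = T[lo:hi], reversed once iff the flag ends set; then the final comparison
def bFinish (S : List String) (T : List String) (r : Nat × Nat × Bool) : Int :=
  if S = (if r.2.2 then ((T.drop r.1).take (r.2.1 - r.1)).reverse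
          else (T.drop r.1).take (r.2.1 - r.1)) then 1 else 0

def TtoS_alt (S : List String) (T : List String) : Int :=
  bFinish S T (bLoop S T T.length 0 T.length false)

-- ===== PRECONDITION & SPEC =====
-- Pre_ excludes exactly the inputs where Python A raises IndexError
-- (T popped empty, then T[-1] fails): those with len(T) < len(S).
def Pre_TtoS (S : List String) (T : List String) : Prop := S.length ≤ T.length
instance (S : List String) (T : List String) : Decidable (Pre_TtoS S T) := by unfold Pre_TtoS; infer_instance
def pvWitness_TtoS : List String × List String := (["A", "B"], ["A", "B", "A"])

def Spec_TtoS (S : List String) (T : List String) (out : Int) : Prop := out = TtoS_alt S T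
instance (S : List String) (T : List String) (out : Int) : Decidable (Spec_TtoS S T out) := by unfold Spec_TtoS; infer_instance

-- ===== CLAIM (what is proved, stated in full; the proofs are below) =====
def Claim_equal_TtoS : Prop := ∀ (S : List String) (T : List String), Dom_TtoS S T → Pre_TtoS S T → Spec_TtoS S T (TtoS S T)

-- ===== LEMMAS AND PROOFS =====

-- the list value of A's T corresponding to B's pointer state (lo, hi, rev)
def pvView (T : List String) (lo hi : Nat) (rev : Bool) : List String :=
  if rev then ((T.drop lo).take (hi - lo)).reverse else (T.drop lo).take (hi - lo)

theorem pvView_false (T : List String) (lo hi : Nat) :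
    pvView T lo hi false = (T.drop lo).take (hi - lo) := rfl

theorem pvView_true (T : List String) (lo hi : Nat) :
    pvView T lo hi true = ((T.drop lo).take (hi - lo)).reverse := rfl

theorem pvView_length (T : List String) (lo hi : Nat) (h2 : hi ≤ T.length) (rev : Bool) :
    (pvView T lo hi rev).length = hi - lo := by
  unfold pvView
  cases rev <;> simp <;> omega

theorem pvSeg_getLast? (T : List String) (lo hi : Nat) (h1 : lo < hi) (h2 : hi ≤ T.length) :
    ((T.drop lo).take (hi - lo)).getLast? = some (T.getD (hi - 1) "") := by
  rw [List.getLast?_eq_getElem?]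
  have hlen : ((T.drop lo).take (hi - lo)).length = hi - lo := by simp; omega
  rw [hlen, List.getElem?_take_of_lt (by omega), List.getElem?_drop]
  have hidx : lo + (hi - lo - 1) = hi - 1 := by omega
  rw [hidx, List.getD_eq_getElem?_getD, List.getElem?_eq_getElem (by omega)]
  simp

theorem pvSeg_head? (T : List String) (lo hi : Nat) (h1 : lo < hi) (h2 : hi ≤ T.length) :
    ((T.drop lo).take (hi - lo)).head? = some (T.getD lo "") := by
  rw [List.head?_eq_getElem?]
  rw [List.getElem?_take_of_lt (by omega), List.getElem?_drop, List.getD_eq_getElem?_getD]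
  simp [List.getElem?_eq_getElem (show lo < T.length by omega)]

theorem pvSeg_dropLast (T : List String) (lo hi : Nat) (h2 : hi ≤ T.length) :
    ((T.drop lo).take (hi - lo)).dropLast = (T.drop lo).take (hi - 1 - lo) := by
  rw [List.dropLast_eq_take, List.take_take]
  congr 1
  simp
  omega

theorem pvSeg_tail (T : List String) (lo hi : Nat) :
    ((T.drop lo).take (hi - lo)).tail = (T.drop (lo + 1)).take (hi - (lo + 1)) := by
  rw [← List.drop_one, List.drop_take, List.drop_drop]
  congr 1 <;> omega

theorem rev_dropLast {α : Type} (l : List α) : l.reverse.dropLast = l.tail.reverse := by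
  cases l with
  | nil => simp
  | cons a t => simp

-- main invariant: A's loop on the viewed list equals B's pointer loop
theorem pvLoop_eq (S T : List String) : ∀ (fuel lo hi : Nat) (rev : Bool),
    hi - lo ≤ fuel → hi ≤ T.length → S.length ≤ hi - lo →
    aLoopA S (pvView T lo hi rev) =
      pvView T (bLoop S T fuel lo hi rev).1 (bLoop S T fuel lo hi rev).2.1
        (bLoop S T fuel lo hi rev).2.2 := by
  intro fuel
  induction fuel with
  | zero =>
    intro lo hi rev hf h2 hS
    rw [bLoop, aLoopA, if_pos (by rw [pvView_length T lo hi h2]; omega)]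
  | succ m ih =>
    intro lo hi rev hf h2 hS
    by_cases heq : S.length = hi - lo
    · cases rev with
      | false =>
        rw [bLoop, if_neg (by omega), aLoopA,
          if_pos (by rw [pvView_length T lo hi h2]; omega)]
      | true =>
        rw [bLoop, if_neg (by omega), aLoopA,
          if_pos (by rw [pvView_length T lo hi h2]; omega)]
    · have hlt : S.length < hi - lo := by omega
      have hlo : lo < hi := by omega
      have hne : pvView T lo hi rev ≠ [] := by
        intro hnil
        have hl := pvView_length T lo hi h2 rev
        rw [hnil] at hl
        simp at hl
        omega
      cases rev with
      | false =>
        have hlast : (pvView T lo hi false).getLastD "" = T.getD (hi - 1) "" := by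
          rw [pvView_false, List.getLastD_eq_getLast?, pvSeg_getLast? T lo hi hlo h2]
          rfl
        have hdl : (pvView T lo hi false).dropLast = pvView T lo (hi - 1) false := by
          rw [pvView_false, pvView_false, pvSeg_dropLast T lo hi h2]
        rw [aLoopA, if_neg (by rw [pvView_length T lo hi h2]; omega), dif_neg hne, hlast]
        rw [bLoop, if_pos hlt]
        by_cases hA : T.getD (hi - 1) "" = "A"
        · rw [if_pos hA, if_neg (fun hc => hc hA), hdl]
          exact ih lo (hi - 1) false (by omega) (by omega) (by omega)
        · rw [if_neg hA, if_pos hA, hdl]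
          have hrv : (pvView T lo (hi - 1) false).reverse = pvView T lo (hi - 1) true := by
            rw [pvView_false, pvView_true]
          rw [hrv]
          exact ih lo (hi - 1) true (by omega) (by omega) (by omega)
      | true =>
        have hlast : (pvView T lo hi true).getLastD "" = T.getD lo "" := by
          rw [pvView_true, List.getLastD_eq_getLast?, List.getLast?_reverse,
            pvSeg_head? T lo hi hlo h2]
          rfl
        have hdl : (pvView T lo hi true).dropLast = pvView T (lo + 1) hi true := by
          rw [pvView_true, pvView_true, rev_dropLast, pvSeg_tail]
        rw [aLoopA, if_neg (by rw [pvView_length T lo hi h2]; omega), dif_neg hne, hlast]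
        rw [bLoop, if_pos hlt]
        by_cases hA : T.getD lo "" = "A"
        · rw [if_pos hA, if_neg (fun hc => hc hA), hdl]
          exact ih (lo + 1) hi true (by omega) (by omega) (by omega)
        · rw [if_neg hA, if_pos hA, hdl]
          have hrv : (pvView T (lo + 1) hi true).reverse = pvView T (lo + 1) hi false := by
            rw [pvView_true, pvView_false, List.reverse_reverse]
          rw [hrv]
          exact ih (lo + 1) hi false (by omega) (by omega) (by omega)

-- ===== VERDICT (by name: the statement is the Claim_ definition above) =====
theorem TtoS_spec : Claim_equal_TtoS := by
  intro S T _hDom hPre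
  unfold Spec_TtoS TtoS TtoS_alt bFinish
  have key := pvLoop_eq S T T.length 0 T.length false (by omega) (by omega)
    (by simpa using hPre)
  have h0 : pvView T 0 T.length false = T := by simp [pvView]
  rw [h0] at key
  rw [key, pvView]
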